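-- pv_equiv track=rewrite | github.com/MrBrantCode/unitest_baseline | mut_generate/mist_train_taco/taco_2896/solution.py | is_teacher_suspicious
-- ===== SOURCE A (Python) =====
-- def is_teacher_suspicious(task_order: str) -> str:
--     used = []
--     for i in range(len(task_order) - 1):
--         if task_order[i + 1] == task_order[i]:
--             continue
--         elif task_order[i + 1] in used:
--             return "NO"
--         else:
--             used.append(task_order[i])
--     return "YES"
-- ===== SOURCE B (Python) =====
-- def is_teacher_suspicious(task_order: str) -> str:
--     # Phase 1: run-length compress into block representatives
--     blocks = []
--     for ch in task_order:
--         if not blocks or blocks[-1] != ch: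
--             blocks.append(ch)
--     # Phase 2: suspicious iff some block character repeats
--     return "NO" if len(set(blocks)) != len(blocks) else "YES"
-- ===== Notes on version B (the rewrite author's own statement) =====
-- stated objective: simpler
-- what changed: Replaces A's indexed pairwise scan with its inline membership test against previously finished block characters and early return by two separate phases: run-length compression into block representatives, then a single global duplicate check comparing len(set(blocks)) with len(blocks).
import Mathlib
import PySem

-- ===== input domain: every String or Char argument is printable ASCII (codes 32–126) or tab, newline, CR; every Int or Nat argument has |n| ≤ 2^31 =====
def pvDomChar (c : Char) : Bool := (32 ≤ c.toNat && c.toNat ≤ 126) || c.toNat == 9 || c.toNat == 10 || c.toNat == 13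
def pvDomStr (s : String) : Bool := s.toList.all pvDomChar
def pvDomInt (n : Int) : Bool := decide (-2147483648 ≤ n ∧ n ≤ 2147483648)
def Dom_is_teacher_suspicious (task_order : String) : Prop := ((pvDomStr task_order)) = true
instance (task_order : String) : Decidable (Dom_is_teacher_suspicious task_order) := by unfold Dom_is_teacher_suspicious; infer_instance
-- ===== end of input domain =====

-- B replaces A's single indexed scan (with an inline membership test against finished
-- block-end characters) by two phases: run-length compression, then one global
-- duplicate check on the compressed list; objective: simpler.

-- ===== PORT A =====
-- A's loop over i in range(len-1) reads the adjacent pair (task_order[i], task_order[i+1]);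
-- ported as recursion over the char list looking at the leading pair, same state `used`.
def isusLoopA (used : List Char) : List Char → String
  | c1 :: c2 :: rest =>
    if c2 == c1 then isusLoopA used (c2 :: rest)
    else if used.contains c2 then "NO"
    else isusLoopA (used ++ [c1]) (c2 :: rest)
  | _ => "YES"

def is_teacher_suspicious (task_order : String) : String :=
  isusLoopA [] task_order.toList

-- ===== PORT B =====
-- Phase 1 of Source B: for ch in task_order: if not blocks or blocks[-1] != ch: blocks.append(ch)
def altCompress (blocks : List Char) : List Char → List Char
  | [] => blocks
  | ch :: rest =>
    if blocks = [] ∨ blocks.getLast? ≠ some ch then altCompress (blocks ++ [ch]) rest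
    else altCompress blocks rest

def is_teacher_suspicious_alt (task_order : String) : String :=
  let blocks := altCompress [] task_order.toList
  if (PySem.Set.ofList blocks).length ≠ blocks.length then "NO" else "YES"

-- ===== PRECONDITION & SPEC =====
def Spec_is_teacher_suspicious (task_order : String) (out : String) : Prop := out = is_teacher_suspicious_alt task_order
instance (task_order : String) (out : String) : Decidable (Spec_is_teacher_suspicious task_order out) := by unfold Spec_is_teacher_suspicious; infer_instance

-- ===== CLAIM (what is proved, stated in full; the proofs are below) =====
def Claim_equal_is_teacher_suspicious : Prop := ∀ (task_order : String), Dom_is_teacher_suspicious task_order → Spec_is_teacher_suspicious task_order (is_teacher_suspicious task_order)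

-- ===== LEMMAS AND PROOFS =====

-- run-length compression given the previous character (if any)
def cmpFrom (last : Option Char) : List Char → List Char
  | [] => []
  | c :: rest => if last = some c then cmpFrom last rest else c :: cmpFrom (some c) rest

-- A's loop restated on the compressed tail
def scanA (used : List Char) (c : Char) : List Char → String
  | [] => "YES"
  | d :: rest => if used.contains d then "NO" else scanA (used ++ [c]) d rest

theorem altCompress_eq (l : List Char) : ∀ acc, altCompress acc l = acc ++ cmpFrom acc.getLast? l := by
  induction l with
  | nil => intro acc; simp [altCompress, cmpFrom]
  | cons c rest ih =>
    intro acc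
    by_cases h : acc.getLast? = some c
    · have hne : acc ≠ [] := by intro h0; simp [h0] at h
      simp [altCompress, cmpFrom, h, hne, ih]
    · have hcond : acc = [] ∨ acc.getLast? ≠ some c := Or.inr h
      simp only [altCompress, cmpFrom, if_pos hcond, if_neg h, ih (acc ++ [c]),
        List.getLast?_concat, List.append_assoc, List.singleton_append]
theorem chain_cmpFrom (t : List Char) : ∀ c, List.IsChain (· ≠ ·) (c :: cmpFrom (some c) t) := by
  induction t with
  | nil => intro c; exact List.isChain_singleton c
  | cons d rest ih =>
    intro c
    by_cases h : c = d
    · have he : cmpFrom (some c) (d :: rest) = cmpFrom (some c) rest := by simp [cmpFrom, h]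
      rw [he, h]; exact ih d
    · have he : cmpFrom (some c) (d :: rest) = d :: cmpFrom (some d) rest := by
        simp [cmpFrom, h]
      rw [he]; exact List.isChain_cons_cons.mpr ⟨h, ih d⟩

theorem isusLoopA_eq_scanA (t : List Char) : ∀ used c,
    isusLoopA used (c :: t) = scanA used c (cmpFrom (some c) t) := by
  induction t with
  | nil => intro used c; simp [isusLoopA, cmpFrom, scanA]
  | cons d rest ih =>
    intro used c
    by_cases h : d = c
    · subst h
      have he : cmpFrom (some d) (d :: rest) = cmpFrom (some d) rest := by simp [cmpFrom]
      simp only [isusLoopA, beq_self_eq_true, if_true, he]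
      exact ih used d
    · simp only [isusLoopA, beq_iff_eq, if_neg h, cmpFrom,
        if_neg (by simp [Ne.symm h] : ¬ (some c = some d)), scanA]
      by_cases hm : d ∈ used
      · simp [hm]
      · simp only [List.contains_eq_mem, decide_eq_true_eq, if_neg hm]
        exact ih (used ++ [c]) d

theorem scanA_eq_nodup (cs : List Char) : ∀ used c, used.Nodup → c ∉ used →
    List.IsChain (· ≠ ·) (c :: cs) →
    scanA used c cs = if (used ++ c :: cs).Nodup then "YES" else "NO" := by
  induction cs with
  | nil =>
    intro used c hu hc _
    have hn : (used ++ [c]).Nodup := by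
      have h2 : ∀ a ∈ used, ¬ a = c := fun a ha h => hc (h ▸ ha)
      simp only [List.nodup_append, hu, true_and]
      exact ⟨List.nodup_singleton c, fun a ha b hb => (List.mem_singleton.mp hb) ▸ h2 a ha⟩
    simp [scanA, hn]
  | cons d rest ih =>
    intro used c hu hc hchain
    have hcd : c ≠ d := (List.isChain_cons_cons.mp hchain).1
    have hchain' : List.IsChain (· ≠ ·) (d :: rest) := (List.isChain_cons_cons.mp hchain).2
    by_cases hm : d ∈ used
    · have hnd : ¬ (used ++ c :: d :: rest).Nodup := by
        intro hn
        exact (List.disjoint_of_nodup_append hn) hm (by simp)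
      simp [scanA, hm, hnd]
    · have hstep : scanA used c (d :: rest) = scanA (used ++ [c]) d rest := by
        simp [scanA, hm]
      have hu' : (used ++ [c]).Nodup := by
        have h2 : ∀ a ∈ used, ¬ a = c := fun a ha h => hc (h ▸ ha)
        simp only [List.nodup_append, hu, true_and]
        exact ⟨List.nodup_singleton c, fun a ha b hb => (List.mem_singleton.mp hb) ▸ h2 a ha⟩
      have hd' : d ∉ used ++ [c] := by
        simp [hm, Ne.symm hcd]
      rw [hstep, ih (used ++ [c]) d hu' hd' hchain']
      have hap : used ++ [c] ++ d :: rest = used ++ c :: d :: rest := by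
        simp [List.append_assoc]
      rw [hap]

theorem ofList_length_iff_nodup (xs : List Char) :
    (PySem.Set.ofList xs).length = xs.length ↔ xs.Nodup := by
  constructor
  · intro h
    have h3 : (PySem.Set.ofList xs).dedup = PySem.Set.ofList xs :=
      List.dedup_eq_self.mpr (PySem.Set.nodup_ofList xs)
    have hf : (PySem.Set.ofList xs).toFinset = xs.toFinset := by
      ext a; simp [List.mem_toFinset, PySem.Set.mem_ofList]
    have h1 : xs.dedup.length = xs.length := by
      have c1 := List.card_toFinset xs
      have c2 := List.card_toFinset (PySem.Set.ofList xs)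
      rw [hf, h3, h] at c2
      omega
    exact List.dedup_eq_self.mp (xs.dedup_sublist.eq_of_length h1)
  · intro h; rw [PySem.Set.ofList_eq_self_of_nodup xs h]

theorem main_eq (l : List Char) :
    isusLoopA [] l =
      (if (PySem.Set.ofList (altCompress [] l)).length ≠ (altCompress [] l).length
        then "NO" else "YES") := by
  cases l with
  | nil => simp [isusLoopA, altCompress]
  | cons h t =>
    have hb : altCompress [] (h :: t) = h :: cmpFrom (some h) t := by
      rw [altCompress_eq]
      simp [cmpFrom]
    rw [hb, isusLoopA_eq_scanA,
      scanA_eq_nodup (cmpFrom (some h) t) [] h List.nodup_nil (by simp) (chain_cmpFrom t h)]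
    simp only [List.nil_append]
    by_cases hn : (h :: cmpFrom (some h) t).Nodup
    · rw [if_pos hn, if_neg (not_not.mpr ((ofList_length_iff_nodup _).mpr hn))]
    · have hne : (PySem.Set.ofList (h :: cmpFrom (some h) t)).length ≠
          (h :: cmpFrom (some h) t).length := fun hL => hn ((ofList_length_iff_nodup _).mp hL)
      rw [if_neg hn, if_pos hne]

-- ===== VERDICT (by name: the statement is the Claim_ definition above) =====
theorem is_teacher_suspicious_spec : Claim_equal_is_teacher_suspicious := by
  intro s _
  unfold Spec_is_teacher_suspicious is_teacher_suspicious is_teacher_suspicious_alt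
  exact main_eq s.toList
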